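-- pv_equiv track=rewrite | github.com/nsolly03/panCov-rtc-discovery | scripts/05_interface_NSP9-NSP12_5.py | consensus_hotspots
-- ===== SOURCE A (Python) =====
-- def consensus_hotspots(results):
--     from collections import Counter
--     c12 = Counter()
--     c9  = Counter()
--     for r in results:
--         c12.update([p for p,_ in r["top20_NSP12"]])
--         c9.update( [p for p,_ in r["top20_NSP9"]])
--     # With only 2 structures lower threshold to ≥1
--     hot12 = sorted([p for p,cnt in c12.items()
--                     if cnt >= 1],
--                    key=lambda x:-c12[x])
--     hot9  = sorted([p for p,cnt in c9.items()
--                     if cnt >= 1],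
--                    key=lambda x:-c9[x])
--     # Consensus ≥2 (present in both)
--     con12 = sorted([p for p,cnt in c12.items()
--                     if cnt >= 2],
--                    key=lambda x:-c12[x])
--     con9  = sorted([p for p,cnt in c9.items()
--                     if cnt >= 2],
--                    key=lambda x:-c9[x])
--     return hot12, hot9, con12, con9
-- ===== SOURCE B (Python) =====
-- def consensus_hotspots(results):
--     # bucket/counting approach: tally with a plain dict, invert into count->positions
--     # buckets, then emit hot and con together in one descending sweep over the counts
--     # range -- no comparison sort of positions at all.
--     def tally(key):
--         counts = {}
--         for r in results:
--             for p, _ in r[key]: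
--                 counts[p] = counts.get(p, 0) + 1
--         return counts
--
--     def rank(counts):
--         if not counts:
--             return [], []
--         buckets = {}
--         for p, c in counts.items():
--             buckets.setdefault(c, []).append(p)
--         hot, con = [], []
--         for c in range(max(buckets), 0, -1):
--             for p in buckets.get(c, []):
--                 hot.append(p)
--                 if c >= 2:
--                     con.append(p)
--         return hot, con
--
--     hot12, con12 = rank(tally("top20_NSP12"))
--     hot9, con9 = rank(tally("top20_NSP9"))
--     return hot12, hot9, con12, con9
-- ===== Notes on version B (the rewrite author's own statement) =====
-- stated objective: alternative
-- what changed: B replaces A's four comparison sorts of positions keyed by negative count with a counting/bucket scheme: it tallies with a plain dict, inverts it into a count->positions multimap, and emits hot and consensus together in one descending sweep over the integer count range, never comparison-sorting positions.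
import Mathlib
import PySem

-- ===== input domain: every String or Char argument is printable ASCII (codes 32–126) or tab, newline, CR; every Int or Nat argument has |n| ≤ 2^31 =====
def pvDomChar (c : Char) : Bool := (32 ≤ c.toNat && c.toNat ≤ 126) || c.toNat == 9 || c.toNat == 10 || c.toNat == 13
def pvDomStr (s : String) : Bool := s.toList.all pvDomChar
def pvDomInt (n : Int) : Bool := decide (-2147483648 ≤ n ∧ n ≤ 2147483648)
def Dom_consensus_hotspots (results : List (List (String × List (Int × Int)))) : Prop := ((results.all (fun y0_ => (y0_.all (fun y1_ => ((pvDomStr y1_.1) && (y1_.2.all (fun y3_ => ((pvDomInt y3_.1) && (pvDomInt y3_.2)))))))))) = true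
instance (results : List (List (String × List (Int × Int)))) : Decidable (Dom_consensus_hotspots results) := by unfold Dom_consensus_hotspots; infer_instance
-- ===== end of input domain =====

-- B replaces A's four comparison sorts (positions keyed by negative count) with a
-- counting/bucket scheme: tally, invert into a count→positions multimap, and emit hot
-- and consensus together in one descending sweep over the count range (objective: alternative).

-- ===== PORT A =====
-- [p for p,_ in r[key]]; r[key] is first-match lookup; the default [] is never reached
-- inside Pre_, which requires the key to be present
def pvPositions (r : List (String × List (Int × Int))) (key : String) : List Int :=
  ((PySem.Dict.mk r).getD key []).map Prod.fst

-- A's Counter-building loop: per result, c.update(positions)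
def pvTally (results : List (List (String × List (Int × Int)))) (key : String) :
    PySem.Dict Int Int :=
  results.foldl
    (fun d r => (pvPositions r key).foldl (fun d p => d.modify p 0 (· + 1)) d)
    PySem.Dict.empty

def consensus_hotspots (results : List (List (String × List (Int × Int)))) : List Int × List Int × List Int × List Int :=
  let c12 := pvTally results "top20_NSP12"
  let c9 := pvTally results "top20_NSP9"
  let hot12 := PySem.List.sorted ((c12.items.filter (fun pc => 1 ≤ pc.2)).map Prod.fst)
      (fun x => -(c12.getD x 0)) false
  let hot9 := PySem.List.sorted ((c9.items.filter (fun pc => 1 ≤ pc.2)).map Prod.fst)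
      (fun x => -(c9.getD x 0)) false
  let con12 := PySem.List.sorted ((c12.items.filter (fun pc => 2 ≤ pc.2)).map Prod.fst)
      (fun x => -(c12.getD x 0)) false
  let con9 := PySem.List.sorted ((c9.items.filter (fun pc => 2 ≤ pc.2)).map Prod.fst)
      (fun x => -(c9.getD x 0)) false
  (hot12, hot9, con12, con9)

-- ===== PORT B =====
-- B's tally: plain dict, counts[p] = counts.get(p, 0) + 1 in a nested loop
def pvTallyB (results : List (List (String × List (Int × Int)))) (key : String) :
    PySem.Dict Int Int :=
  results.foldl
    (fun counts r =>
      ((PySem.Dict.mk r).getD key []).foldl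
        (fun counts pq => counts.insert pq.1 (counts.getD pq.1 0 + 1)) counts)
    PySem.Dict.empty

-- B's rank: invert counts into count→positions buckets, then one descending sweep
-- over range(max(buckets), 0, -1) appending to hot and (when c >= 2) to con.
-- The 'if not counts' guard returns ([], []) exactly as Source B does.
def pvRank (counts : PySem.Dict Int Int) : List Int × List Int :=
  if counts.items = [] then ([], [])
  else
    let buckets := counts.items.foldl
      (fun b pc => b.modify pc.2 [] (fun l => l ++ [pc.1])) PySem.Dict.empty
    -- max(buckets): buckets is nonempty here, so Python's max never raises; .getD 0 is unreachable
    let maxc := (PySem.List.max? buckets.keys (fun x => x)).getD 0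
    (PySem.List.pyRange maxc 0 (-1)).foldl
      (fun hc c =>
        (buckets.getD c []).foldl
          (fun hc p => (hc.1 ++ [p], if 2 ≤ c then hc.2 ++ [p] else hc.2)) hc)
      ([], [])

def consensus_hotspots_alt (results : List (List (String × List (Int × Int)))) : List Int × List Int × List Int × List Int :=
  let p12 := pvRank (pvTallyB results "top20_NSP12")
  let p9 := pvRank (pvTallyB results "top20_NSP9")
  (p12.1, p9.1, p12.2, p9.2)

-- ===== PRECONDITION & SPEC =====
-- Pre_ excludes exactly the inputs on which A raises KeyError: some result dict lacks
-- the key "top20_NSP12" or "top20_NSP9".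
def Pre_consensus_hotspots (results : List (List (String × List (Int × Int)))) : Prop :=
  ∀ r ∈ results, (PySem.Dict.mk r).contains "top20_NSP12" = true ∧
    (PySem.Dict.mk r).contains "top20_NSP9" = true
instance (results : List (List (String × List (Int × Int)))) : Decidable (Pre_consensus_hotspots results) := by unfold Pre_consensus_hotspots; infer_instance

def pvWitness_consensus_hotspots : (List (List (String × List (Int × Int)))) :=
  [[("top20_NSP12", [(3, 0), (5, 1)]), ("top20_NSP9", [(2, 0)])],
   [("top20_NSP12", [(5, 2)]), ("top20_NSP9", [(2, 1), (7, 0)])]]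

def Spec_consensus_hotspots (results : List (List (String × List (Int × Int)))) (out : List Int × List Int × List Int × List Int) : Prop := out = consensus_hotspots_alt results
instance (results : List (List (String × List (Int × Int)))) (out : List Int × List Int × List Int × List Int) : Decidable (Spec_consensus_hotspots results out) := by unfold Spec_consensus_hotspots; infer_instance

-- ===== CLAIM (what is proved, stated in full; the proofs are below) =====
def Claim_equal_consensus_hotspots : Prop := ∀ (results : List (List (String × List (Int × Int)))), Dom_consensus_hotspots results → Pre_consensus_hotspots results → Spec_consensus_hotspots results (consensus_hotspots results)

-- ===== LEMMAS AND PROOFS =====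

theorem insertBy_congr {α : Type} (b1 b2 : α → α → Bool) (x : α) (ys : List α)
    (h : ∀ y ∈ ys, b1 x y = b2 x y) :
    PySem.List.insertBy b1 x ys = PySem.List.insertBy b2 x ys := by
  induction ys with
  | nil => rfl
  | cons y t ih =>
    simp only [PySem.List.insertBy, h y (by simp)]
    split
    · rfl
    · simp only [List.cons.injEq, true_and]
      exact ih (fun y hy => h y (by simp [hy]))

theorem sorted_key_congr {α κ : Type} [LinearOrder κ] (l : List α) (k1 k2 : α → κ)
    (h : ∀ x ∈ l, k1 x = k2 x) :
    PySem.List.sorted l k1 false = PySem.List.sorted l k2 false := by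
  rw [PySem.List.sorted_eq_foldl_insertBy, PySem.List.sorted_eq_foldl_insertBy]
  suffices H : ∀ (l' : List α) (acc : List α), (∀ x ∈ l', k1 x = k2 x) → (∀ y ∈ acc, k1 y = k2 y) →
      l'.foldl (fun acc x => PySem.List.insertBy (fun a b => decide (k1 a < k1 b)) x acc) acc
        = l'.foldl (fun acc x => PySem.List.insertBy (fun a b => decide (k2 a < k2 b)) x acc) acc by
    exact H l [] h (by simp)
  intro l'
  induction l' with
  | nil => simp
  | cons x t ih =>
    intro acc h1 h2
    simp only [List.foldl_cons]
    rw [insertBy_congr _ (fun a b => decide (k2 a < k2 b)) x acc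
      (fun y hy => by rw [h1 x (by simp), h2 y hy])]
    exact ih _ (fun z hz => h1 z (by simp [hz]))
      (fun y hy => by
        rcases (PySem.List.mem_insertBy _ _ _ _).mp hy with h | h
        · rw [h]; exact h1 x (by simp)
        · exact h2 y h)

theorem insertBy_map {α β : Type} (bf : β → β → Bool) (f : α → β) (x : α) (ys : List α) :
    PySem.List.insertBy bf (f x) (ys.map f)
      = (PySem.List.insertBy (fun a b => bf (f a) (f b)) x ys).map f := by
  induction ys with
  | nil => rfl
  | cons y t ih =>
    simp only [List.map_cons, PySem.List.insertBy]
    split <;> simp_all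

theorem sorted_map {α β κ : Type} [LinearOrder κ] (l : List α) (f : α → β) (k : β → κ) :
    PySem.List.sorted (l.map f) k false
      = (PySem.List.sorted l (fun a => k (f a)) false).map f := by
  rw [PySem.List.sorted_eq_foldl_insertBy, PySem.List.sorted_eq_foldl_insertBy]
  suffices H : ∀ (l' : List α) (acc : List α),
      (l'.map f).foldl (fun a x => PySem.List.insertBy (fun a b => decide (k a < k b)) x a) (acc.map f)
        = (l'.foldl (fun a x => PySem.List.insertBy (fun a b => decide (k (f a) < k (f b))) x a) acc).map f by
    exact H l []
  intro l'
  induction l' with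
  | nil => simp
  | cons x t ih =>
    intro acc
    simp only [List.map_cons, List.foldl_cons]
    rw [insertBy_map (fun a b => decide (k a < k b)) f x acc]
    exact ih _

theorem pairwise_insertBy {α κ : Type} [LinearOrder κ] (k : α → κ) (x : α) (ys : List α)
    (h : ys.Pairwise (fun a b => k a ≤ k b)) :
    (PySem.List.insertBy (fun a b => decide (k a < k b)) x ys).Pairwise (fun a b => k a ≤ k b) := by
  induction ys with
  | nil => simp [PySem.List.insertBy]
  | cons y t ih =>
    rw [List.pairwise_cons] at h
    simp only [PySem.List.insertBy]
    split
    · rename_i hlt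
      simp only [decide_eq_true_eq] at hlt
      refine List.pairwise_cons.mpr ⟨?_, List.pairwise_cons.mpr h⟩
      intro z hz
      rcases List.mem_cons.mp hz with rfl | hz
      · exact le_of_lt hlt
      · exact le_trans (le_of_lt hlt) (h.1 z hz)
    · rename_i hge
      simp only [decide_eq_true_eq, not_lt] at hge
      refine List.pairwise_cons.mpr ⟨?_, ih h.2⟩
      intro z hz
      rcases (PySem.List.mem_insertBy _ _ _ _).mp hz with rfl | hz
      · exact hge
      · exact h.1 z hz

theorem insertBy_all_before {α : Type} (bf : α → α → Bool) (x : α) (zs : List α)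
    (h : ∀ z ∈ zs, bf x z = true) :
    PySem.List.insertBy bf x zs = x :: zs := by
  cases zs with
  | nil => rfl
  | cons z t => simp [PySem.List.insertBy, h z (by simp)]

theorem filter_insertBy_pos {α κ : Type} [LinearOrder κ] (k : α → κ) (q : α → Bool) (x : α)
    (ys : List α) (hq : q x = true) (hs : ys.Pairwise (fun a b => k a ≤ k b)) :
    (PySem.List.insertBy (fun a b => decide (k a < k b)) x ys).filter q
      = PySem.List.insertBy (fun a b => decide (k a < k b)) x (ys.filter q) := by
  induction ys with
  | nil => simp [PySem.List.insertBy, hq]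
  | cons y t ih =>
    rw [List.pairwise_cons] at hs
    simp only [PySem.List.insertBy]
    split
    · rename_i hlt
      simp only [decide_eq_true_eq] at hlt
      cases hqy : q y with
      | true =>
        simp only [List.filter_cons, hqy, hq, if_true]
        simp only [PySem.List.insertBy, decide_eq_true_eq, if_pos hlt]
      | false =>
        simp only [List.filter_cons, hqy, hq, if_true, Bool.false_eq_true, if_false]
        rw [insertBy_all_before (fun a b => decide (k a < k b)) x (t.filter q)
          (fun z hz => by
            have hzt := List.mem_of_mem_filter hz
            exact decide_eq_true (lt_of_lt_of_le hlt (hs.1 z hzt)))]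
    · rename_i hge
      cases hqy : q y with
      | true =>
        simp only [List.filter_cons, hqy, if_true]
        simp only [PySem.List.insertBy, if_neg hge]
        simp only [List.cons.injEq, true_and]
        exact ih hs.2
      | false =>
        simp only [List.filter_cons, hqy, Bool.false_eq_true, if_false]
        exact ih hs.2

theorem filter_insertBy_neg {α : Type} (bf : α → α → Bool) (q : α → Bool) (x : α)
    (ys : List α) (hq : q x = false) :
    (PySem.List.insertBy bf x ys).filter q = ys.filter q := by
  induction ys with
  | nil => simp [PySem.List.insertBy, hq]
  | cons y t ih =>
    simp only [PySem.List.insertBy]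
    split
    · simp [List.filter, hq]
    · cases hqy : q y <;> simp [List.filter, hqy, ih]

theorem sorted_filter {α κ : Type} [LinearOrder κ] (l : List α) (q : α → Bool) (k : α → κ) :
    PySem.List.sorted (l.filter q) k false = (PySem.List.sorted l k false).filter q := by
  rw [PySem.List.sorted_eq_foldl_insertBy, PySem.List.sorted_eq_foldl_insertBy]
  suffices H : ∀ (l' : List α) (acc : List α), acc.Pairwise (fun a b => k a ≤ k b) →
      (l'.filter q).foldl (fun a x => PySem.List.insertBy (fun a b => decide (k a < k b)) x a) (acc.filter q)
        = (l'.foldl (fun a x => PySem.List.insertBy (fun a b => decide (k a < k b)) x a) acc).filter q by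
    exact H l [] (by simp)
  intro l'
  induction l' with
  | nil => simp
  | cons x t ih =>
    intro acc hacc
    cases hqx : q x with
    | true =>
      simp only [List.filter_cons, hqx, if_true, List.foldl_cons]
      rw [← filter_insertBy_pos k q x acc hqx hacc]
      exact ih _ (pairwise_insertBy k x acc hacc)
    | false =>
      simp only [List.filter_cons, hqx, Bool.false_eq_true, if_false, List.foldl_cons]
      rw [← filter_insertBy_neg (fun a b => decide (k a < k b)) q x acc hqx]
      exact ih _ (pairwise_insertBy k x acc hacc)

-- both tallies are Counter of the flattened position list
theorem pvTally_eq_counter (results : List (List (String × List (Int × Int)))) (key : String) :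
    pvTally results key = PySem.Dict.counter (results.flatMap (fun r => pvPositions r key)) := by
  rw [PySem.Dict.counter_eq_foldl, pvTally]
  generalize PySem.Dict.empty = d
  induction results generalizing d with
  | nil => rfl
  | cons r t ih => simp only [List.foldl_cons, List.flatMap_cons, List.foldl_append, ih]

theorem pvTallyB_eq_pvTally (results : List (List (String × List (Int × Int)))) (key : String) :
    pvTallyB results key = pvTally results key := by
  unfold pvTallyB pvTally
  refine congrFun (congrFun (congrArg _ (funext fun d => funext fun r => ?_)) _) _
  -- inner loop: fold over pairs with insert = fold over mapped firsts with modify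
  -- (Dict.modify x 0 (· + 1) is definitionally Dict.insert x (getD x 0 + 1))
  rw [pvPositions, List.foldl_map]
  rfl

theorem counter_items_pos {κ : Type} [BEq κ] [LawfulBEq κ] (xs : List κ)
    (kv : κ × Int) (h : kv ∈ (PySem.Dict.counter xs).items) : 1 ≤ kv.2 := by
  rw [PySem.Dict.items_counter] at h
  obtain ⟨k, hk, rfl⟩ := List.mem_map.mp h
  have hm : k ∈ xs := (PySem.Set.mem_ofList _ _).mp hk
  have := List.count_pos_iff.mpr hm
  simp
  omega

-- a key-sorted list splits as (minimal-key block, which keeps its order) ++ (the rest)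
theorem sorted_min_split {α : Type} (k : α → Int) (v : Int) (m : List α)
    (hp : m.Pairwise (fun a b => k a ≤ k b)) (hmin : ∀ x ∈ m, k x = v ∨ v < k x) :
    m = m.filter (fun x => decide (k x = v)) ++ m.filter (fun x => !decide (k x = v)) := by
  induction m with
  | nil => rfl
  | cons x t ih =>
    rw [List.pairwise_cons] at hp
    rcases hmin x (by simp) with hx | hx
    · simp only [List.filter_cons, hx, decide_true, Bool.not_true, Bool.false_eq_true, if_false,
        if_true, List.cons_append, List.cons.injEq, true_and]
      exact ih hp.2 (fun y hy => hmin y (by simp [hy]))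
    · have hne : ∀ y ∈ x :: t, ¬ (k y = v) := by
        intro y hy
        rcases List.mem_cons.mp hy with rfl | hy
        · omega
        · have := hp.1 y hy; omega
      have h1 : (x :: t).filter (fun y => decide (k y = v)) = [] :=
        List.filter_eq_nil_iff.mpr (fun y hy => by simp [hne y hy])
      have h2 : (x :: t).filter (fun y => !decide (k y = v)) = x :: t :=
        List.filter_eq_self.mpr (fun y hy => by simp [hne y hy])
      rw [h1, h2, List.nil_append]

-- a key-sorted list is the concatenation of its key-buckets, in key order
theorem bucket_decomp {α : Type} (k : α → Int) :
    ∀ (vs : List Int) (m : List α), vs.Pairwise (· < ·) →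
      m.Pairwise (fun a b => k a ≤ k b) → (∀ x ∈ m, k x ∈ vs) →
      m = vs.flatMap (fun v => m.filter (fun x => decide (k x = v))) := by
  intro vs
  induction vs with
  | nil =>
    intro m _ _ hcov
    cases m with
    | nil => rfl
    | cons x t => exact absurd (hcov x (by simp)) (by simp)
  | cons v vs ih =>
    intro m hvs hp hcov
    rw [List.pairwise_cons] at hvs
    have hmin : ∀ x ∈ m, k x = v ∨ v < k x := by
      intro x hx
      rcases List.mem_cons.mp (hcov x hx) with h | h
      · exact Or.inl h
      · exact Or.inr (hvs.1 _ h)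
    have hsplit := sorted_min_split k v m hp hmin
    set m2 := m.filter (fun x => !decide (k x = v)) with hm2
    have hrest : m2 = vs.flatMap (fun v' => m2.filter (fun x => decide (k x = v'))) := by
      refine ih m2 hvs.2 (List.Pairwise.sublist List.filter_sublist hp) ?_
      intro x hx
      have hxm := List.mem_of_mem_filter hx
      have hxne : ¬ (k x = v) := by
        have := List.of_mem_filter hx; simpa using this
      rcases List.mem_cons.mp (hcov x hxm) with h | h
      · exact absurd h hxne
      · exact h
    have hback : ∀ v' ∈ vs, m2.filter (fun x => decide (k x = v'))
        = m.filter (fun x => decide (k x = v')) := by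
      intro v' hv'
      have hvv' : v ≠ v' := ne_of_lt (hvs.1 _ hv')
      rw [hm2, List.filter_filter]
      refine List.filter_congr (fun x _ => ?_)
      by_cases h : k x = v'
      · simp [h, hvv'.symm]
      · simp [h]
    calc m = m.filter (fun x => decide (k x = v)) ++ m2 := hsplit
    _ = m.filter (fun x => decide (k x = v))
          ++ vs.flatMap (fun v' => m.filter (fun x => decide (k x = v'))) := by
        rw [hrest]; congr 1; exact List.flatMap_congr (fun v' hv' => hback v' hv')
    _ = (v :: vs).flatMap (fun v' => m.filter (fun x => decide (k x = v'))) := by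
        rw [List.flatMap_cons]

-- the bucket of count v, in items order
def pvBucket (c : PySem.Dict Int Int) (v : Int) : List Int :=
  (c.items.filter (fun pc => decide (pc.2 = v))).map Prod.fst

-- A's hot list is the concatenation of the buckets along any strictly descending
-- cover vs of the counts
theorem hotA_eq_flat (c : PySem.Dict Int Int) (hnd : c.keys.Nodup)
    (hpos : ∀ kv ∈ c.items, 1 ≤ kv.2) (vs : List Int) (hvs : vs.Pairwise (· > ·))
    (hcov : ∀ kv ∈ c.items, kv.2 ∈ vs) :
    PySem.List.sorted ((c.items.filter (fun pc => 1 ≤ pc.2)).map Prod.fst)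
        (fun x => -(c.getD x 0)) false
      = vs.flatMap (fun v => pvBucket c v) := by
  have hfil : c.items.filter (fun pc => decide (1 ≤ pc.2)) = c.items :=
    List.filter_eq_self.mpr (fun kv h => decide_eq_true (hpos kv h))
  rw [hfil, sorted_map c.items Prod.fst (fun x => -(c.getD x 0))]
  rw [sorted_key_congr c.items (fun a => -(c.getD a.1 0)) (fun kv => -kv.2)
    (fun kv hkv => by
      obtain ⟨k, v⟩ := kv
      show -(c.getD k 0) = -v
      rw [PySem.Dict.getD_of_mem_items c hkv hnd 0])]
  set m := PySem.List.sorted c.items (fun kv : Int × Int => -kv.2) false with hm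
  have hdec := bucket_decomp (fun kv : Int × Int => -kv.2) (vs.map (fun v => -v)) m
    (by
      rw [List.pairwise_map]
      exact hvs.imp (fun h => by omega))
    (PySem.List.sorted_pairwise c.items (fun kv => -kv.2))
    (by
      intro kv hkv
      have : kv ∈ c.items := (PySem.List.mem_sorted _ _ _ _).mp hkv
      exact List.mem_map.mpr ⟨kv.2, hcov kv this, rfl⟩)
  rw [hdec, List.flatMap_map, List.map_flatMap]
  refine List.flatMap_congr (by
    intro v _
    have hq : ∀ kv : Int × Int, (decide (-kv.2 = -v)) = (decide (kv.2 = v)) := by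
      intro kv; simp only [neg_inj]
    rw [List.filter_congr (fun kv _ => hq kv), hm, ← sorted_filter]
    rw [PySem.List.sorted_eq_self_of_pairwise _ _
      (List.pairwise_of_forall_mem_list (fun a ha b hb => by
        have h1 : a.2 = v := by simpa using List.of_mem_filter ha
        have h2 : b.2 = v := by simpa using List.of_mem_filter hb
        simp [h1, h2]))]
    rfl)

-- A's consensus list: the same decomposition with the count ≥ 2 buckets only
theorem conA_eq_flat (c : PySem.Dict Int Int) (hnd : c.keys.Nodup)
    (vs : List Int) (hvs : vs.Pairwise (· > ·))
    (hcov : ∀ kv ∈ c.items, kv.2 ∈ vs) :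
    PySem.List.sorted ((c.items.filter (fun pc => 2 ≤ pc.2)).map Prod.fst)
        (fun x => -(c.getD x 0)) false
      = vs.flatMap (fun v => if 2 ≤ v then pvBucket c v else []) := by
  rw [sorted_map _ Prod.fst (fun x => -(c.getD x 0))]
  rw [sorted_key_congr _ (fun a : Int × Int => -(c.getD a.1 0)) (fun kv => -kv.2)
    (fun kv hkv => by
      obtain ⟨k, v⟩ := kv
      show -(c.getD k 0) = -v
      rw [PySem.Dict.getD_of_mem_items c (List.mem_of_mem_filter hkv) hnd 0])]
  set l2 := c.items.filter (fun pc => decide (2 ≤ pc.2)) with hl2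
  set m := PySem.List.sorted l2 (fun kv : Int × Int => -kv.2) false with hm
  have hdec := bucket_decomp (fun kv : Int × Int => -kv.2) (vs.map (fun v => -v)) m
    (by
      rw [List.pairwise_map]
      exact hvs.imp (fun h => by omega))
    (PySem.List.sorted_pairwise l2 (fun kv => -kv.2))
    (by
      intro kv hkv
      have : kv ∈ l2 := (PySem.List.mem_sorted _ _ _ _).mp hkv
      exact List.mem_map.mpr ⟨kv.2, hcov kv (List.mem_of_mem_filter this), rfl⟩)
  rw [hdec, List.flatMap_map, List.map_flatMap]
  refine List.flatMap_congr (by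
    intro v _
    have hq : ∀ kv : Int × Int, (decide (-kv.2 = -v)) = (decide (kv.2 = v)) := by
      intro kv; simp only [neg_inj]
    rw [List.filter_congr (fun kv _ => hq kv), hm, ← sorted_filter]
    rw [PySem.List.sorted_eq_self_of_pairwise _ _
      (List.pairwise_of_forall_mem_list (fun a ha b hb => by
        have h1 : a.2 = v := by simpa using List.of_mem_filter ha
        have h2 : b.2 = v := by simpa using List.of_mem_filter hb
        simp [h1, h2]))]
    rw [hl2, List.filter_filter]
    by_cases h2v : 2 ≤ v
    · rw [if_pos h2v, pvBucket]
      refine congrArg _ (List.filter_congr (fun pc _ => ?_))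
      by_cases h : pc.2 = v
      · simp [h, h2v]
      · simp [h]
    · rw [if_neg h2v]
      rw [List.filter_eq_nil_iff.mpr (fun pc _ => by
        by_cases h : pc.2 = v
        · simp [h, h2v]
        · simp [h])]
      simp)

-- B's bucket dict looks up to the items-order bucket
theorem buckets_getD (c : PySem.Dict Int Int) (v : Int) :
    (c.items.foldl (fun b pc => b.modify pc.2 [] (fun l => l ++ [pc.1]))
        PySem.Dict.empty).getD v []
      = pvBucket c v := by
  have hmap : c.items.foldl (fun b pc => b.modify pc.2 [] (fun l => l ++ [pc.1]))
        PySem.Dict.empty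
      = (c.items.map (fun pc => (pc.2, pc.1))).foldl
        (fun b p => b.modify p.1 [] (fun l => l ++ [p.2])) PySem.Dict.empty := by
    rw [List.foldl_map]
  rw [hmap, PySem.Dict.getD_foldl_modify_append, PySem.Dict.getD_empty, List.nil_append]
  rw [pvBucket, List.filter_map, List.map_map]
  refine congrArg _ (List.filter_congr (fun pc _ => ?_))
  by_cases h : pc.2 = v
  · simp [Function.comp, h]
  · simp [Function.comp, h]

-- B's sweep loop produces (hot, con) as concatenations over the sweep order
theorem rank_loop (bget : Int → List Int) :
    ∀ (vs : List Int) (h k : List Int),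
      vs.foldl
        (fun hc c =>
          (bget c).foldl
            (fun hc p => (hc.1 ++ [p], if 2 ≤ c then hc.2 ++ [p] else hc.2)) hc)
        (h, k)
      = (h ++ vs.flatMap bget,
         k ++ vs.flatMap (fun c => if 2 ≤ c then bget c else [])) := by
  have inner : ∀ (c : Int) (l h k : List Int),
      l.foldl (fun hc : List Int × List Int =>
        fun p => (hc.1 ++ [p], if 2 ≤ c then hc.2 ++ [p] else hc.2)) (h, k)
      = (h ++ l, k ++ if 2 ≤ c then l else []) := by
    intro c l
    induction l with
    | nil => intro h k; simp
    | cons p t ih =>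
      intro h k
      simp only [List.foldl_cons, ih]
      by_cases h2 : 2 ≤ c <;> simp [h2]
  intro vs
  induction vs with
  | nil => intro h k; simp
  | cons v t ih =>
    intro h k
    simp only [List.foldl_cons, inner v, ih, List.flatMap_cons, List.append_assoc]

-- the count of every item lies in the descending sweep range
theorem count_mem_range (c : PySem.Dict Int Int) (x : Int) (t : List Int)
    (hkeys : (c.items.foldl (fun b pc => b.modify pc.2 [] (fun l => l ++ [pc.1]))
        PySem.Dict.empty).keys = x :: t)
    (hpos : ∀ kv ∈ c.items, 1 ≤ kv.2) :
    ∀ kv ∈ c.items, kv.2 ∈ PySem.List.pyRange (t.foldl max x) 0 (-1) := by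
  intro kv hkv
  have hk : kv.2 ∈ x :: t := by
    rw [← hkeys]
    have := PySem.Dict.keys_foldl_modify_key c.items (fun pc : Int × Int => pc.2) []
      (fun _ pc l => l ++ [pc.1]) PySem.Dict.empty
    rw [this, PySem.Dict.keys_empty]
    have : PySem.Set.update ([] : List Int) (c.items.map (fun pc => pc.2))
        = PySem.Set.ofList (c.items.map (fun pc => pc.2)) := rfl
    rw [this]
    exact (PySem.Set.mem_ofList _ _).mpr (List.mem_map.mpr ⟨kv, hkv, rfl⟩)
  have hle : kv.2 ≤ t.foldl max x := by
    rcases List.mem_cons.mp hk with h | h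
    · rw [h]; exact (PySem.List.le_foldl_max t x).1
    · exact (PySem.List.le_foldl_max t x).2 kv.2 h
  exact PySem.List.mem_pyRange_neg_one.mpr ⟨hpos kv hkv, hle⟩

-- the descending range is strictly decreasing
theorem pyRange_down_pairwise (a : Int) :
    (PySem.List.pyRange a 0 (-1)).Pairwise (· > ·) := by
  rw [PySem.List.pyRange_neg_one]
  rw [List.pairwise_map]
  exact List.pairwise_lt_range.imp (fun h => by omega)

-- per-counter main lemma: A's two sorted lists = B's rank of the same counter
theorem rank_eq (c : PySem.Dict Int Int) (hnd : c.keys.Nodup)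
    (hpos : ∀ kv ∈ c.items, 1 ≤ kv.2) :
    (PySem.List.sorted ((c.items.filter (fun pc => 1 ≤ pc.2)).map Prod.fst)
        (fun x => -(c.getD x 0)) false,
     PySem.List.sorted ((c.items.filter (fun pc => 2 ≤ pc.2)).map Prod.fst)
        (fun x => -(c.getD x 0)) false)
      = pvRank c := by
  rw [pvRank]
  by_cases hempty : c.items = []
  · rw [if_pos hempty, hempty]
    simp [PySem.List.sorted]
  · rw [if_neg hempty]
    simp only []
    have hkeys : (c.items.foldl (fun b pc => b.modify pc.2 [] (fun l => l ++ [pc.1]))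
        PySem.Dict.empty).keys = PySem.Set.ofList (c.items.map (fun pc => pc.2)) := by
      rw [PySem.Dict.keys_foldl_modify_key c.items (fun pc : Int × Int => pc.2) []
        (fun _ pc l => l ++ [pc.1]) PySem.Dict.empty, PySem.Dict.keys_empty]
      rfl
    obtain ⟨kv, hkv⟩ := List.exists_mem_of_ne_nil _ hempty
    have hmem : kv.2 ∈ (c.items.foldl (fun b pc => b.modify pc.2 [] (fun l => l ++ [pc.1]))
        PySem.Dict.empty).keys := by
      rw [hkeys]
      exact (PySem.Set.mem_ofList _ _).mpr (List.mem_map.mpr ⟨kv, hkv, rfl⟩)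
    cases hk : (c.items.foldl (fun b pc => b.modify pc.2 [] (fun l => l ++ [pc.1]))
        PySem.Dict.empty).keys with
    | nil => rw [hk] at hmem; cases hmem
    | cons x t =>
      rw [PySem.List.max?_id_cons, Option.getD_some]
      rw [rank_loop (fun cc => (c.items.foldl
        (fun b pc => b.modify pc.2 [] (fun l => l ++ [pc.1])) PySem.Dict.empty).getD cc [])]
      simp only [List.nil_append]
      have hcov := count_mem_range c x t hk hpos
      have hpw := pyRange_down_pairwise (t.foldl max x)
      refine Prod.ext ?_ ?_ <;> simp only []
      · rw [hotA_eq_flat c hnd hpos _ hpw hcov]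
        exact List.flatMap_congr (fun v _ => (buckets_getD c v).symm)
      · rw [conA_eq_flat c hnd _ hpw hcov]
        refine List.flatMap_congr (fun v _ => ?_)
        rw [buckets_getD c v]

-- ===== VERDICT (by name: the statement is the Claim_ definition above) =====
theorem consensus_hotspots_spec : Claim_equal_consensus_hotspots := by
  intro results _ _
  unfold Spec_consensus_hotspots consensus_hotspots consensus_hotspots_alt
  rw [pvTallyB_eq_pvTally, pvTallyB_eq_pvTally]
  have h12 := pvTally_eq_counter results "top20_NSP12"
  have h9 := pvTally_eq_counter results "top20_NSP9"
  have e12 := rank_eq (pvTally results "top20_NSP12")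
    (h12 ▸ PySem.Dict.nodup_keys_counter _)
    (fun kv hkv => counter_items_pos _ kv (h12 ▸ hkv))
  have e9 := rank_eq (pvTally results "top20_NSP9")
    (h9 ▸ PySem.Dict.nodup_keys_counter _)
    (fun kv hkv => counter_items_pos _ kv (h9 ▸ hkv))
  rw [← e12, ← e9]
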